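-- pv_equiv track=rewrite | github.com/mmweber2/adm | SAT/sat.py | parse_clauses
-- ===== SOURCE A (Python) =====
-- def parse_clauses(clauses, literals, literals_table):
--     parsed_clauses = []
--     """Helper function for three_sat to parse input clauses."""
--     for clause in clauses:
--         parsed_clause = []
--         clause = clause.split()
--         if len(clause) > 3:
--             raise ValueError("clause {} contains > 3 literals".format(clause))
--         for literal in clause:
--             # Don't treat negated literals as separate entities
--             negated = literal[0] == "!"
--             literal = literal[negated:]
--             if literal not in literals_table:
--                 literals_table[literal] = len(literals)
--                 literals.append(literal)
--             if negated:
--                 parsed_clause.append(0 - literals_table[literal])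
--             else:
--                 parsed_clause.append(literals_table[literal])
--         parsed_clauses.append(parsed_clause)
--     return parsed_clauses
-- ===== SOURCE B (Python) =====
-- def parse_clauses(clauses, literals, literals_table):
--     """Two-pass variant: first intern every literal (same mutation order as the
--     original), then map the cached token lists through the completed table.
--     Mutates literals and literals_table in place exactly like the original."""
--     split_clauses = []
--     for clause in clauses:
--         tokens = clause.split()
--         if len(tokens) > 3:
--             raise ValueError("clause {} contains > 3 literals".format(tokens))
--         split_clauses.append(tokens)
--         for token in tokens:
--             name = token[1:] if token.startswith("!") else token
--             if name not in literals_table: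
--                 literals_table[name] = len(literals)
--                 literals.append(name)
--     return [[-literals_table[t[1:]] if t.startswith("!") else literals_table[t]
--              for t in tokens] for tokens in split_clauses]
-- ===== Notes on version B (the rewrite author's own statement) =====
-- stated objective: alternative
-- what changed: Replaced the single interleaved parse-and-intern loop with two passes: a first pass that only interns literals into the symbol table (same first-encounter order), then a pure mapping pass over the cached token lists through the completed table.
import Mathlib
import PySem

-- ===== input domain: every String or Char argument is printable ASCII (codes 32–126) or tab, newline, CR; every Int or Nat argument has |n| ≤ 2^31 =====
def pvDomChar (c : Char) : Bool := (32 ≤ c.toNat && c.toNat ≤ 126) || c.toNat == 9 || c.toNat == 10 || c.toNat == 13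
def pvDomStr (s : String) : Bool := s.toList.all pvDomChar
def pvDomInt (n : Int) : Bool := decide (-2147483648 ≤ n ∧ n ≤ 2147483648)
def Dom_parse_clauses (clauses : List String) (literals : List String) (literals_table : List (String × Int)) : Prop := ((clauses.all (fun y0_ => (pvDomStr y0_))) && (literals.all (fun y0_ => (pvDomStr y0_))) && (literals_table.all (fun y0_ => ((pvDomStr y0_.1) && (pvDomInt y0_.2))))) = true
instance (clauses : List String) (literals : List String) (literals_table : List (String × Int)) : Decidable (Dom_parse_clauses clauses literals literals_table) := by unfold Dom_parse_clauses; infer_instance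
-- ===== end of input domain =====

-- B replaces A's single interleaved parse-and-intern loop by two passes (intern all
-- literals first, then map the cached token lists through the completed table);
-- objective: alternative decomposition, same cost. Both versions mutate
-- literals/literals_table in place identically; the equivalence proved is about the
-- return value.

-- ===== PORT A =====
-- inner loop body: one literal of a clause; state = (literals, literals_table, parsed_clause)
def pvA_tok (st : List String × PySem.Dict String Int × List Int) (tok : String) :
    List String × PySem.Dict String Int × List Int :=
  let negated : Bool := PySem.Str.pyGet? tok 0 == some '!'
  let lit : String := if negated then String.mk (PySem.List.slice tok.toList (some 1) none) else tok
  let st1 : List String × PySem.Dict String Int :=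
    if st.2.1.contains lit then (st.1, st.2.1)
    else (st.1 ++ [lit], st.2.1.insert lit (st.1.length : Int))
  let v : Int := st1.2.getD lit 0
  (st1.1, st1.2, st.2.2 ++ [if negated then 0 - v else v])

-- outer loop body; on a clause with > 3 tokens Python raises ValueError (excluded by Pre_)
def pvA_clause (st : List (List Int) × List String × PySem.Dict String Int) (clause : String) :
    List (List Int) × List String × PySem.Dict String Int :=
  let toks := PySem.Str.split₀ clause
  if 3 < toks.length then st
  else
    let r := toks.foldl pvA_tok (st.2.1, st.2.2, [])
    (st.1 ++ [r.2.2], r.1, r.2.1)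

def parse_clauses (clauses : List String) (literals : List String) (literals_table : List (String × Int)) : List (List Int) :=
  (clauses.foldl pvA_clause ([], literals, PySem.Dict.mk literals_table)).1

-- ===== PORT B =====
-- name = token[1:] if token.startswith("!") else token, paired with the negation flag
def pvB_name (tok : String) : Bool × String :=
  if PySem.Str.startswith tok "!" then (true, String.mk (PySem.List.slice tok.toList (some 1) none))
  else (false, tok)

-- pass-1 inner step: intern one literal; state = (literals, literals_table)
def pvB_internTok (p : List String × PySem.Dict String Int) (tok : String) :
    List String × PySem.Dict String Int :=
  let name := (pvB_name tok).2
  if p.2.contains name then p else (p.1 ++ [name], p.2.insert name (p.1.length : Int))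

-- pass-1 outer step; on a clause with > 3 tokens Source B raises ValueError (excluded by Pre_)
def pvB_pass1 (st : List (List String) × List String × PySem.Dict String Int) (clause : String) :
    List (List String) × List String × PySem.Dict String Int :=
  let toks := PySem.Str.split₀ clause
  if 3 < toks.length then st
  else
    let p := toks.foldl pvB_internTok (st.2.1, st.2.2)
    (st.1 ++ [toks], p.1, p.2)

-- pass-2 cell: the comprehension expression of Source B, against the completed table
def pvB_tokVal (tbl : PySem.Dict String Int) (tok : String) : Int :=
  let n := pvB_name tok
  if n.1 then -(tbl.getD n.2 0) else tbl.getD n.2 0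

def parse_clauses_alt (clauses : List String) (literals : List String) (literals_table : List (String × Int)) : List (List Int) :=
  let r := clauses.foldl pvB_pass1 ([], literals, PySem.Dict.mk literals_table)
  r.1.map (fun toks => toks.map (pvB_tokVal r.2.2))

-- ===== PRECONDITION & SPEC =====
-- Pre_ excludes exactly the inputs where some clause splits into more than 3 tokens:
-- there A (and B) raise ValueError instead of returning.
def Pre_parse_clauses (clauses : List String) (literals : List String) (literals_table : List (String × Int)) : Prop :=
  ∀ c ∈ clauses, (PySem.Str.split₀ c).length ≤ 3
instance (clauses : List String) (literals : List String) (literals_table : List (String × Int)) : Decidable (Pre_parse_clauses clauses literals literals_table) := by unfold Pre_parse_clauses; infer_instance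

def pvWitness_parse_clauses : List String × List String × (List (String × Int)) :=
  (["a !b", "b c x", "!a"], ["p"], [("p", 0)])

def Spec_parse_clauses (clauses : List String) (literals : List String) (literals_table : List (String × Int)) (out : List (List Int)) : Prop := out = parse_clauses_alt clauses literals literals_table
instance (clauses : List String) (literals : List String) (literals_table : List (String × Int)) (out : List (List Int)) : Decidable (Spec_parse_clauses clauses literals literals_table out) := by unfold Spec_parse_clauses; infer_instance

-- ===== CLAIM (what is proved, stated in full; the proofs are below) =====
def Claim_equal_parse_clauses : Prop := ∀ (clauses : List String) (literals : List String) (literals_table : List (String × Int)), Dom_parse_clauses clauses literals literals_table → Pre_parse_clauses clauses literals literals_table → Spec_parse_clauses clauses literals literals_table (parse_clauses clauses literals literals_table)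

-- ===== LEMMAS AND PROOFS =====

-- "table t' extends table t": every binding of t is still there
def pvExt (t t' : PySem.Dict String Int) : Prop :=
  ∀ k v, t.get? k = some v → t'.get? k = some v

theorem pvExt_refl (t : PySem.Dict String Int) : pvExt t t := fun _ _ h => h

theorem pvExt_trans {a b c : PySem.Dict String Int} (h1 : pvExt a b) (h2 : pvExt b c) : pvExt a c :=
  fun k v h => h2 k v (h1 k v h)

theorem pv_not_contains_get? (t : PySem.Dict String Int) (k : String)
    (hc : t.contains k = false) : t.get? k = none := by
  have h := PySem.Dict.contains_eq_isSome_get? (d := t) (k := k)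
  rw [hc] at h
  cases hg : t.get? k with
  | none => rfl
  | some v => rw [hg] at h; simp at h

-- A's test literal[0] == "!" agrees with B's startswith
theorem pv_neg_eq (tok : String) :
    (PySem.Str.pyGet? tok 0 == some '!') = PySem.Str.startswith tok "!" := by
  simp only [PySem.Str.pyGet?_eq, PySem.Str.startswith_eq, PySem.Chars.pyGet?_eq_listPyGet?]
  cases h : tok.toList with
  | nil => simp [PySem.Chars.startswith, PySem.List.pyGet?, PySem.List.pyIdx?]
  | cons c cs => simp [PySem.Chars.startswith, PySem.List.pyGet?, PySem.List.pyIdx?, List.isPrefixOf, eq_comm]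

-- A's inner step is B's intern step plus a lookup in the post-step table
theorem pvA_tok_eq (l : List String) (t : PySem.Dict String Int) (pc : List Int) (tok : String) :
    pvA_tok (l, t, pc) tok =
      ((pvB_internTok (l, t) tok).1, (pvB_internTok (l, t) tok).2,
        pc ++ [pvB_tokVal (pvB_internTok (l, t) tok).2 tok]) := by
  unfold pvA_tok pvB_internTok pvB_tokVal pvB_name
  rw [pv_neg_eq]
  simp only [PySem.Str.startswith_eq]
  by_cases hs : PySem.Chars.startswith tok.toList ['!'] = true <;>
    simp [hs, zero_sub]

-- after interning tok, its name is bound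
theorem pv_present (l : List String) (t : PySem.Dict String Int) (tok : String) :
    ∃ v, ((pvB_internTok (l, t) tok).2).get? (pvB_name tok).2 = some v := by
  unfold pvB_internTok
  by_cases hc : t.contains (pvB_name tok).2 = true
  · simp only [hc, if_true]
    have h := PySem.Dict.contains_eq_isSome_get? (d := t) (k := (pvB_name tok).2)
    rw [hc] at h
    cases hg : t.get? (pvB_name tok).2 with
    | none => rw [hg] at h; simp at h
    | some v => exact ⟨v, rfl⟩
  · simp only [hc, if_false, Bool.false_eq_true]
    exact ⟨(l.length : Int), PySem.Dict.get?_insert_self _ _ _⟩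

theorem pvExt_internTok (p : List String × PySem.Dict String Int) (tok : String) :
    pvExt p.2 (pvB_internTok p tok).2 := by
  unfold pvB_internTok
  by_cases hc : p.2.contains (pvB_name tok).2 = true
  · simp only [hc, if_true]; exact pvExt_refl _
  · simp only [hc, if_false, Bool.false_eq_true]
    intro k v hk
    have hne : k ≠ (pvB_name tok).2 := by
      intro he
      rw [he, pv_not_contains_get? _ _ (by simpa using hc)] at hk
      simp at hk
    rw [PySem.Dict.get?_insert_of_ne _ _ hne]
    exact hk

theorem pvExt_internToks (toks : List String) (p : List String × PySem.Dict String Int) :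
    pvExt p.2 (toks.foldl pvB_internTok p).2 := by
  induction toks generalizing p with
  | nil => exact pvExt_refl _
  | cons tok rest ih =>
    simp only [List.foldl_cons]
    exact pvExt_trans (pvExt_internTok p tok) (ih _)

theorem pvExt_pass1 (clauses : List String) (st : List (List String) × List String × PySem.Dict String Int) :
    pvExt st.2.2 (clauses.foldl pvB_pass1 st).2.2 := by
  induction clauses generalizing st with
  | nil => exact pvExt_refl _
  | cons c cs ih =>
    simp only [List.foldl_cons]
    refine pvExt_trans ?_ (ih (pvB_pass1 st c))
    unfold pvB_pass1
    by_cases h3 : 3 < (PySem.Str.split₀ c).length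
    · simp only [h3, if_true]; exact pvExt_refl _
    · simp only [h3, if_false]
      exact pvExt_internToks _ (st.2.1, st.2.2)

-- clause-level: A's inner fold = B's intern fold, values read through any extending table
theorem pvA_inner (toks : List String) (l : List String) (t : PySem.Dict String Int) (pc : List Int)
    (tbl' : PySem.Dict String Int) (hx : pvExt (toks.foldl pvB_internTok (l, t)).2 tbl') :
    toks.foldl pvA_tok (l, t, pc) =
      ((toks.foldl pvB_internTok (l, t)).1, (toks.foldl pvB_internTok (l, t)).2,
        pc ++ toks.map (pvB_tokVal tbl')) := by
  induction toks generalizing l t pc with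
  | nil => simp
  | cons tok rest ih =>
    simp only [List.foldl_cons, List.map_cons]
    rw [pvA_tok_eq]
    obtain ⟨v, hv⟩ := pv_present l t tok
    have hv' : tbl'.get? (pvB_name tok).2 = some v := by
      apply hx
      exact pvExt_internToks rest (pvB_internTok (l, t) tok) _ _ hv
    have hval : pvB_tokVal (pvB_internTok (l, t) tok).2 tok = pvB_tokVal tbl' tok := by
      simp [pvB_tokVal, PySem.Dict.getD_eq_get?_getD, hv, hv']
    rw [hval]
    have hx' : pvExt (rest.foldl pvB_internTok
        ((pvB_internTok (l, t) tok).1, (pvB_internTok (l, t) tok).2)).2 tbl' := by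
      simpa using hx
    rw [ih _ _ _ hx']
    simp

-- branch lemmas for the two outer-loop bodies
theorem pvA_clause_pos (st : List (List Int) × List String × PySem.Dict String Int) (c : String)
    (h3 : 3 < (PySem.Str.split₀ c).length) : pvA_clause st c = st := by
  unfold pvA_clause; simp [h3]

theorem pvA_clause_neg (a : List (List Int)) (l : List String) (t : PySem.Dict String Int) (c : String)
    (h3 : ¬ 3 < (PySem.Str.split₀ c).length) :
    pvA_clause (a, l, t) c =
      (a ++ [((PySem.Str.split₀ c).foldl pvA_tok (l, t, [])).2.2],
        ((PySem.Str.split₀ c).foldl pvA_tok (l, t, [])).1,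
        ((PySem.Str.split₀ c).foldl pvA_tok (l, t, [])).2.1) := by
  unfold pvA_clause; simp [h3]

theorem pvB_pass1_pos (st : List (List String) × List String × PySem.Dict String Int) (c : String)
    (h3 : 3 < (PySem.Str.split₀ c).length) : pvB_pass1 st c = st := by
  unfold pvB_pass1; simp [h3]

theorem pvB_pass1_neg (a : List (List String)) (l : List String) (t : PySem.Dict String Int) (c : String)
    (h3 : ¬ 3 < (PySem.Str.split₀ c).length) :
    pvB_pass1 (a, l, t) c =
      (a ++ [PySem.Str.split₀ c],
        ((PySem.Str.split₀ c).foldl pvB_internTok (l, t)).1,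
        ((PySem.Str.split₀ c).foldl pvB_internTok (l, t)).2) := by
  unfold pvB_pass1; simp [h3]

-- accumulator lemmas
theorem pvA_acc (clauses : List String) (acc : List (List Int)) (l : List String) (t : PySem.Dict String Int) :
    clauses.foldl pvA_clause (acc, l, t) =
      (acc ++ (clauses.foldl pvA_clause ([], l, t)).1, (clauses.foldl pvA_clause ([], l, t)).2) := by
  induction clauses generalizing acc l t with
  | nil => simp
  | cons c cs ih =>
    simp only [List.foldl_cons]
    by_cases h3 : 3 < (PySem.Str.split₀ c).length
    · rw [pvA_clause_pos (acc, l, t) c h3, pvA_clause_pos ([], l, t) c h3, ih acc, ih []]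
    · rw [pvA_clause_neg acc l t c h3, pvA_clause_neg [] l t c h3, ih (acc ++ _), ih ([] ++ _)]
      simp

theorem pvB_acc (clauses : List String) (acc : List (List String)) (l : List String) (t : PySem.Dict String Int) :
    clauses.foldl pvB_pass1 (acc, l, t) =
      (acc ++ (clauses.foldl pvB_pass1 ([], l, t)).1, (clauses.foldl pvB_pass1 ([], l, t)).2) := by
  induction clauses generalizing acc l t with
  | nil => simp
  | cons c cs ih =>
    simp only [List.foldl_cons]
    by_cases h3 : 3 < (PySem.Str.split₀ c).length
    · rw [pvB_pass1_pos (acc, l, t) c h3, pvB_pass1_pos ([], l, t) c h3, ih acc, ih []]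
    · rw [pvB_pass1_neg acc l t c h3, pvB_pass1_neg [] l t c h3, ih (acc ++ _), ih ([] ++ _)]
      simp

theorem pv_main (clauses : List String) (l : List String) (t : PySem.Dict String Int)
    (hpre : ∀ c ∈ clauses, (PySem.Str.split₀ c).length ≤ 3) :
    clauses.foldl pvA_clause ([], l, t) =
      ((clauses.foldl pvB_pass1 ([], l, t)).1.map
          (fun toks => toks.map (pvB_tokVal (clauses.foldl pvB_pass1 ([], l, t)).2.2)),
        (clauses.foldl pvB_pass1 ([], l, t)).2) := by
  induction clauses generalizing l t with
  | nil => simp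
  | cons c cs ih =>
    have h3 : ¬ 3 < (PySem.Str.split₀ c).length := by
      have := hpre c (List.mem_cons_self ..)
      omega
    simp only [List.foldl_cons]
    rw [pvA_clause_neg [] l t c h3, pvB_pass1_neg [] l t c h3]
    have hx : pvExt ((PySem.Str.split₀ c).foldl pvB_internTok (l, t)).2
        (cs.foldl pvB_pass1 ([], ((PySem.Str.split₀ c).foldl pvB_internTok (l, t)).1,
          ((PySem.Str.split₀ c).foldl pvB_internTok (l, t)).2)).2.2 := by
      simpa using pvExt_pass1 cs ([], ((PySem.Str.split₀ c).foldl pvB_internTok (l, t)).1,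
        ((PySem.Str.split₀ c).foldl pvB_internTok (l, t)).2)
    rw [pvA_inner (PySem.Str.split₀ c) l t [] _ hx]
    simp only [List.nil_append]
    rw [pvB_acc cs [PySem.Str.split₀ c] ((PySem.Str.split₀ c).foldl pvB_internTok (l, t)).1
      ((PySem.Str.split₀ c).foldl pvB_internTok (l, t)).2]
    rw [pvA_acc cs
      [List.map (pvB_tokVal (List.foldl pvB_pass1 ([], ((PySem.Str.split₀ c).foldl pvB_internTok (l, t)).1,
          ((PySem.Str.split₀ c).foldl pvB_internTok (l, t)).2) cs).2.2) (PySem.Str.split₀ c)]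
      ((PySem.Str.split₀ c).foldl pvB_internTok (l, t)).1
      ((PySem.Str.split₀ c).foldl pvB_internTok (l, t)).2]
    rw [ih _ _ (fun x hmem => hpre x (List.mem_cons_of_mem _ hmem))]
    simp

-- ===== VERDICT (by name: the statement is the Claim_ definition above) =====
theorem parse_clauses_spec : Claim_equal_parse_clauses := by
  intro clauses literals literals_table _ hpre
  unfold Spec_parse_clauses parse_clauses parse_clauses_alt
  rw [pv_main clauses literals (PySem.Dict.mk literals_table) hpre]
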